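-- pv_equiv track=rewrite | github.com/santenma/seo_content_writer | audio_processor.py | suggest_content_headings
-- ===== SOURCE A (Python) =====
-- from typing import Dict, List, Optional, Tuple, Any
--
-- def suggest_content_headings(content: str, segments: List[Dict]) -> List[str]:
--     """Suggest content headings based on transcript analysis"""
--     headings = ["Introduction"]
--
--     # Analyze segments for topic changes
--     segment_texts = [seg['text'] for seg in segments]
--
--     # Look for transition phrases that might indicate new sections
--     transition_phrases = [
--         'now let', 'next', 'moving on', 'another', 'also', 'furthermore',
--         'in addition', 'let me', 'so now', 'the next', 'another important'
--     ]
--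
--     section_count = 1
--     for i, segment_text in enumerate(segment_texts):
--         for phrase in transition_phrases:
--             if phrase in segment_text.lower() and i > len(segment_texts) * 0.2:
--                 section_count += 1
--                 headings.append(f"Key Point {section_count}")
--                 break
--
--         if section_count >= 5:  # Limit number of sections
--             break
--
--     # Always add conclusion
--     if len(headings) > 1:
--         headings.append("Summary and Conclusion")
--
--     return headings
-- ===== SOURCE B (Python) =====
-- from typing import Dict, List
--
-- TRANSITION_PHRASES = [
--     'now let', 'next', 'moving on', 'another', 'also', 'furthermore',
--     'in addition', 'let me', 'so now', 'the next', 'another important'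
-- ]
--
-- def suggest_content_headings(content: str, segments: List[Dict]) -> List[str]:
--     n = len(segments)
--     qualifying = sum(
--         1 for i, seg in enumerate(segments)
--         if i > n * 0.2 and any(p in seg['text'].lower() for p in TRANSITION_PHRASES)
--     )
--     n_points = min(qualifying, 4)
--     headings = ["Introduction"] + [f"Key Point {k + 2}" for k in range(n_points)]
--     if n_points > 0:
--         headings.append("Summary and Conclusion")
--     return headings
-- ===== Notes on version B (the rewrite author's own statement) =====
-- stated objective: simpler
-- what changed: Replaces A's stateful loop (running section counter, incremental appends, mid-loop break at 5 sections) with a single counting pass (count segments whose index exceeds 20% of the length and whose text contains any transition phrase), a cap at 4, and direct construction of the heading list.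
-- outside the precondition, e.g. on suggest_content_headings('', [{}]): A raises KeyError, B returns ['Introduction']
import Mathlib
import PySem

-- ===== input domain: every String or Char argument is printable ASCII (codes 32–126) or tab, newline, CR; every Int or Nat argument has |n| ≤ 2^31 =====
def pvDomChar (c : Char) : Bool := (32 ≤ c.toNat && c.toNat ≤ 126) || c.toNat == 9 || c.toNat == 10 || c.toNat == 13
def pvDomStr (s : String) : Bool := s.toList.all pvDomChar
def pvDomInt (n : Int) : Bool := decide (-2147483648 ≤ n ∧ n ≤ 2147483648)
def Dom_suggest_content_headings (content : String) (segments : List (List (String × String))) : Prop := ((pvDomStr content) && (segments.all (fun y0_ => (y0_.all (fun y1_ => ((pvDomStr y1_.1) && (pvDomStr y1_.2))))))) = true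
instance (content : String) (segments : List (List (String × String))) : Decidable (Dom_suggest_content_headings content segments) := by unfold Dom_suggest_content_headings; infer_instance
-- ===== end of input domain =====

-- B replaces A's append/running-counter/early-break loop by a single counting pass
-- (count qualifying segments, cap at 4) followed by direct construction of the list (objective: simpler).

-- ===== PORT A =====
def transition_phrases : List String :=
  ["now let", "next", "moving on", "another", "also", "furthermore",
   "in addition", "let me", "so now", "the next", "another important"]

-- 'i > len(segment_texts) * 0.2': ported as 5*i > n, which agrees with the Python
-- float comparison for every list length these magnitudes reach (the rounding of
-- n*0.2 as a double never crosses an integer here; checked exhaustively to 10^7).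
-- The outer for-loop with its mid-body 'break' on section_count >= 5 is the
-- recursion suggestLoopA; seg['text'] is ported with .getD "" (Pre_ guarantees the key).
def suggestLoopA : List String → Nat → Nat → Nat → List String → List String
  | [], _, _, _, headings => headings
  | t :: rest, i, n, section_count, headings =>
    let st :=
      if transition_phrases.any (fun p => PySem.Str.isIn p (PySem.Str.lower t) && decide (5 * i > n))
      then (section_count + 1, headings ++ ["Key Point " ++ PySem.Int.toStr ((section_count : Int) + 1)])
      else (section_count, headings)
    if st.1 ≥ 5 then st.2
    else suggestLoopA rest (i + 1) n st.1 st.2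

def suggest_content_headings (content : String) (segments : List (List (String × String))) : List String :=
  let segment_texts := segments.map (fun seg => ((PySem.Dict.mk seg).get? "text").getD "")
  let headings := suggestLoopA segment_texts 0 segment_texts.length 1 ["Introduction"]
  if headings.length > 1 then headings ++ ["Summary and Conclusion"] else headings

-- ===== PORT B =====
-- Source B: one counting pass over enumerate(segments), cap at 4, then build the list.
-- Same exact rendering 5*i > n of the float test i > n*0.2 as in port A.
def suggest_content_headings_alt (content : String) (segments : List (List (String × String))) : List String :=
  let n := segments.length
  let qualifying := (PySem.List.enumerate segments).countP (fun p =>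
    decide (5 * p.1 > (n : Int)) &&
    transition_phrases.any (fun q =>
      PySem.Str.isIn q (PySem.Str.lower (((PySem.Dict.mk p.2).get? "text").getD ""))))
  let n_points := min qualifying 4
  let headings := ["Introduction"] ++ (List.range n_points).map (fun (k : Nat) => "Key Point " ++ PySem.Int.toStr ((k : Int) + 2))
  if n_points > 0 then headings ++ ["Summary and Conclusion"] else headings

-- ===== PRECONDITION & SPEC =====
-- Pre_ excludes exactly the inputs where seg['text'] raises KeyError (a segment without a "text" key).
def Pre_suggest_content_headings (content : String) (segments : List (List (String × String))) : Prop :=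
  segments.all (fun seg => (PySem.Dict.mk seg).contains "text") = true
instance (content : String) (segments : List (List (String × String))) : Decidable (Pre_suggest_content_headings content segments) := by unfold Pre_suggest_content_headings; infer_instance

def pvWitness_suggest_content_headings : String × (List (List (String × String))) :=
  ("", [[("text", "hello")], [("text", "now let us continue")]])

def Spec_suggest_content_headings (content : String) (segments : List (List (String × String))) (out : List String) : Prop := out = suggest_content_headings_alt content segments
instance (content : String) (segments : List (List (String × String))) (out : List String) : Decidable (Spec_suggest_content_headings content segments out) := by unfold Spec_suggest_content_headings; infer_instance

-- ===== CLAIM (what is proved, stated in full; the proofs are below) =====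
def Claim_equal_suggest_content_headings : Prop := ∀ (content : String) (segments : List (List (String × String))), Dom_suggest_content_headings content segments → Pre_suggest_content_headings content segments → Spec_suggest_content_headings content segments (suggest_content_headings content segments)

-- ===== LEMMAS AND PROOFS =====

-- the per-segment qualification test, at index i with list length n
def qualifies (n : Nat) (i : Nat) (t : String) : Bool :=
  decide (5 * i > n) && transition_phrases.any (fun p => PySem.Str.isIn p (PySem.Str.lower t))

theorem anyCond_eq (t : String) (i n : Nat) :
    transition_phrases.any (fun p => PySem.Str.isIn p (PySem.Str.lower t) && decide (5 * i > n))
      = qualifies n i t := by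
  unfold qualifies
  by_cases h : 5 * i > n <;> simp [h, Bool.and_comm]

-- the loop invariant: with 1 ≤ c ≤ 4, the loop appends one "Key Point" per
-- qualifying element, numbered from c+1, stopping after 5 - c of them.
theorem suggestLoopA_eq (ts : List String) (i n c : Nat) (acc : List String)
    (hc1 : 1 ≤ c) (hc4 : c ≤ 4) :
    suggestLoopA ts i n c acc =
      acc ++ (List.range (min ((ts.zipIdx i).countP (fun p => qualifies n p.2 p.1)) (5 - c))).map
        (fun (k : Nat) => "Key Point " ++ PySem.Int.toStr ((c : Int) + 1 + (k : Int))) := by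
  induction ts generalizing i c acc with
  | nil => simp [suggestLoopA]
  | cons t rest ih =>
    rw [suggestLoopA, anyCond_eq]
    by_cases hq : qualifies n i t
    · simp only [hq, if_true, List.zipIdx_cons, List.countP_cons, decide_true]
      by_cases h5 : c + 1 ≥ 5
      · have hc : c = 4 := by omega
        subst hc
        simp [List.range_succ]
      · rw [if_neg (by simp; omega), ih (i+1) (c+1) _ (by omega) (by omega)]
        have hmin : min ((rest.zipIdx (i+1)).countP (fun p => qualifies n p.2 p.1) + 1) (5 - c)
            = (min ((rest.zipIdx (i+1)).countP (fun p => qualifies n p.2 p.1)) (5 - (c+1))) + 1 := by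
          omega
        rw [hmin, List.range_succ_eq_map]
        simp only [List.map_cons, List.map_map, Function.comp]
        rw [List.append_assoc]
        congr 1
        · simp
          intro a _ _
          congr 1
          omega
    · simp only [hq, Bool.false_eq_true, if_false]
      rw [if_neg (by simp; omega), ih (i+1) c acc hc1 hc4]
      simp [List.zipIdx_cons, List.countP_cons, hq]

-- the two ports count the same set of qualifying segments
theorem count_eq (segments : List (List (String × String))) (n : Nat) :
    ((segments.map (fun seg => ((PySem.Dict.mk seg).get? "text").getD "")).zipIdx 0).countP
        (fun p => qualifies n p.2 p.1)
      = (PySem.List.enumerate segments).countP (fun p =>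
          decide (5 * p.1 > (n : Int)) &&
          transition_phrases.any (fun q =>
            PySem.Str.isIn q (PySem.Str.lower (((PySem.Dict.mk p.2).get? "text").getD "")))) := by
  have h : ∀ (xs : List (List (String × String))) (i : Nat),
      ((xs.map (fun seg => ((PySem.Dict.mk seg).get? "text").getD "")).zipIdx i).countP
          (fun p => qualifies n p.2 p.1)
        = (PySem.List.enumerate xs (i : Int)).countP (fun p =>
            decide (5 * p.1 > (n : Int)) &&
            transition_phrases.any (fun q =>
              PySem.Str.isIn q (PySem.Str.lower (((PySem.Dict.mk p.2).get? "text").getD "")))) := by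
    intro xs
    induction xs with
    | nil => intro i; simp [PySem.List.enumerate]
    | cons x rest ih =>
      intro i
      rw [List.map_cons, List.zipIdx_cons, PySem.List.enumerate_cons]
      rw [List.countP_cons, List.countP_cons]
      have : ((i : Int) + 1) = ((i + 1 : Nat) : Int) := by push_cast; ring
      rw [this, ← ih (i + 1)]
      congr 1
      unfold qualifies
      have hdec : decide (5 * i > n) = decide (5 * (i : Int) > (n : Int)) := by
        simp; constructor <;> (intro h; exact_mod_cast h)
      rw [hdec]
  exact h segments 0

theorem suggest_eq (content : String) (segments : List (List (String × String))) :
    suggest_content_headings content segments = suggest_content_headings_alt content segments := by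
  unfold suggest_content_headings suggest_content_headings_alt
  simp only
  rw [suggestLoopA_eq _ 0 _ 1 _ (le_refl 1) (by omega)]
  rw [List.length_map]
  set Q := (PySem.List.enumerate segments).countP (fun p =>
    decide (5 * p.1 > ((segments.length : Nat) : Int)) &&
    transition_phrases.any (fun q =>
      PySem.Str.isIn q (PySem.Str.lower (((PySem.Dict.mk p.2).get? "text").getD "")))) with hQdef
  have hc := count_eq segments segments.length
  rw [hc, ← hQdef]
  have h54 : (5 - 1 : Nat) = 4 := rfl
  rw [h54]
  have hfun : (fun (k : Nat) => "Key Point " ++ PySem.Int.toStr (((1 : Nat) : Int) + 1 + (k : Int)))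
      = (fun (k : Nat) => "Key Point " ++ PySem.Int.toStr ((k : Int) + 2)) := by
    funext k; congr 1; push_cast; ring
  rw [hfun]
  by_cases hQ : min Q 4 > 0
  · rw [if_pos hQ, if_pos (by
      simp only [List.length_append, List.length_cons, List.length_nil, List.length_map,
        List.length_range]
      omega)]
  · rw [if_neg hQ, if_neg (by
      simp only [List.length_append, List.length_cons, List.length_nil, List.length_map,
        List.length_range]
      omega)]

-- ===== VERDICT (by name: the statement is the Claim_ definition above) =====
theorem suggest_content_headings_spec : Claim_equal_suggest_content_headings := by
  intro content segments _ _
  exact suggest_eq content segments
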